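-- pv_equiv track=rewrite | github.com/aseghehey/robot-construction-algorithms | robotomaton/comparison.py | robotomaton
-- ===== SOURCE A (Python) =====
-- def robotomaton(num, cache, previous, sprockets):
--     if cache[num] != -1:
--         return cache[num]
--
--     if previous[num] == 0:
--         return sprockets[num]
--
--     cost = sprockets[num]
--     for i in range(num - 1, num - previous[num] - 1, -1):
--         cost += robotomaton(i, cache, previous, sprockets)
--
--     cache[num] = cost
--     return cache[num]
-- ===== SOURCE B (Python) =====
-- # Bottom-up DP: one pass with a running prefix-sum list replaces A's memoized recursion.
-- # Equivalence is about the RETURN value only: A writes computed costs back into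
-- # `cache` in place; B never mutates its arguments.
-- def robotomaton(num, cache, previous, sprockets):
--     if cache[num] != -1:
--         return cache[num]
--     prefix = [0]  # prefix[k] = sum of the costs of robots 0..k-1
--     v = 0
--     for i in range(num + 1):
--         if cache[i] != -1:
--             v = cache[i]
--         elif previous[i] <= 0:
--             v = sprockets[i]
--         else:
--             v = sprockets[i] + prefix[i] - prefix[i - previous[i]]
--         prefix.append(prefix[i] + v)
--     return v
-- ===== Notes on version B (the rewrite author's own statement) =====
-- stated objective: alternative
-- what changed: Replaces the memoized top-down recursion (whose inner loop re-sums a contiguous range of prior costs via recursive calls) by a single bottom-up pass that maintains a prefix-sum list of the costs; B also does not mutate the cache argument.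
-- outside the precondition, e.g. on robotomaton(-1, [-1], [0], [5]): A returns 5, B returns 0; on robotomaton(1, [-1, -1], [5, 0], [3, 7]): A returns 7, B raises IndexError
import Mathlib
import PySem

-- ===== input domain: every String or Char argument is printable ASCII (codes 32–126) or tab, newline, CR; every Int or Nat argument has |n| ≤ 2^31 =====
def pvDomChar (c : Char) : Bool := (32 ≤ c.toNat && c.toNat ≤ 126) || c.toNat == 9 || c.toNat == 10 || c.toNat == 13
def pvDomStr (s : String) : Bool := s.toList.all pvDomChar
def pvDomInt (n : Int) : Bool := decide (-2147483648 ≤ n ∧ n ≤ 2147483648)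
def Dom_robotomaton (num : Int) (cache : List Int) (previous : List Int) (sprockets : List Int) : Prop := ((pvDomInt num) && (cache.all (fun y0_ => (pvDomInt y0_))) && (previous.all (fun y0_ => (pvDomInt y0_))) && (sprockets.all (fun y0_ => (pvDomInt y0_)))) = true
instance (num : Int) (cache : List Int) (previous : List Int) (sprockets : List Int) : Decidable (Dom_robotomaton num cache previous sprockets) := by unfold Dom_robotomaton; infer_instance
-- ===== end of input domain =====

-- B replaces A's memoized recursion by one bottom-up pass that maintains a prefix-sum list;
-- the equivalence is about the return value only (Python A mutates `cache` in place, B does not).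


-- ===== PORT A =====
-- literal transliteration of A; the recursion is driven by a fuel parameter that only
-- makes the same computation total (depth of A's recursion is ≤ num+1 on Pre_ inputs)
def robotomatonFuel : Nat → Int → List Int → List Int → List Int → Int × List Int
  | 0, _, cache, _, _ => (0, cache)
  | fuel + 1, num, cache, previous, sprockets =>
    match PySem.List.pyGet? cache num with
    | none => (0, cache)                      -- IndexError (outside Pre_)
    | some c =>
      if c ≠ -1 then (c, cache)
      else
        match PySem.List.pyGet? previous num with
        | none => (0, cache)                  -- IndexError (outside Pre_)
        | some p =>
          if p = 0 then
            match PySem.List.pyGet? sprockets num with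
            | none => (0, cache)              -- IndexError (outside Pre_)
            | some s => (s, cache)
          else
            match PySem.List.pyGet? sprockets num with
            | none => (0, cache)              -- IndexError (outside Pre_)
            | some s =>
              let r := (PySem.List.pyRange (num - 1) (num - p - 1) (-1)).foldl
                (fun (acc : Int × List Int) i =>
                  let t := robotomatonFuel fuel i acc.2 previous sprockets
                  (acc.1 + t.1, t.2)) (s, cache)
              (r.1, PySem.List.pySetD r.2 num r.1)

def robotomaton (num : Int) (cache : List Int) (previous : List Int) (sprockets : List Int) : Int :=
  (robotomatonFuel (num.toNat + 1) num cache previous sprockets).1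

-- ===== PORT B =====
def robotomaton_alt (num : Int) (cache : List Int) (previous : List Int) (sprockets : List Int) : Int :=
  match PySem.List.pyGet? cache num with
  | none => 0                                 -- IndexError (outside Pre_)
  | some c =>
    if c ≠ -1 then c
    else
      ((PySem.List.pyRange 0 (num + 1) 1).foldl
        (fun (st : List Int × Int) i =>
          let v :=
            if PySem.List.pyGetD cache i 0 ≠ -1 then PySem.List.pyGetD cache i 0
            else if PySem.List.pyGetD previous i 0 ≤ 0 then PySem.List.pyGetD sprockets i 0
            else PySem.List.pyGetD sprockets i 0 + PySem.List.pyGetD st.1 i 0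
                 - PySem.List.pyGetD st.1 (i - PySem.List.pyGetD previous i 0) 0
          (st.1 ++ [PySem.List.pyGetD st.1 i 0 + v], v))
        ([0], 0)).2

-- ===== PRECONDITION & SPEC =====
-- Pre_ excludes inputs on which A raises (num out of range; recursion reaching an index
-- outside the lists) and, when cache[num] = -1, the inputs on which A's index arithmetic
-- would wrap around a negative index (Python negative-indexing quirk): it requires
-- 0 ≤ num within all three lists and previous[i] ≤ i for every uncached i ≤ num, so every
-- range the recursion sums stays inside [0, num).  Cache hits (cache[num] ≠ -1) are always in.
def Pre_robotomaton (num : Int) (cache : List Int) (previous : List Int) (sprockets : List Int) : Prop :=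
  PySem.Raise.InRange cache.length num ∧
  (PySem.List.pyGetD cache num 0 ≠ -1 ∨
    (0 ≤ num ∧ num < previous.length ∧ num < sprockets.length ∧
      ∀ i : Nat, (i : Int) ≤ num → cache.getD i 0 = -1 → previous.getD i 0 ≤ (i : Int)))
instance (num : Int) (cache : List Int) (previous : List Int) (sprockets : List Int) : Decidable (Pre_robotomaton num cache previous sprockets) := by
  unfold Pre_robotomaton
  have : Decidable (∀ i : Nat, (i : Int) ≤ num → cache.getD i 0 = -1 → previous.getD i 0 ≤ (i : Int)) := by
    refine decidable_of_iff
      (((List.range (num.toNat + 1)).all (fun i => decide ((i : Int) ≤ num → cache.getD i 0 = -1 → previous.getD i 0 ≤ (i : Int)))) = true) ?_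
    simp only [List.all_eq_true, List.mem_range, decide_eq_true_eq]
    constructor
    · intro h i hi
      exact h i (by omega) hi
    · intro h i _ hi; exact h i hi
  infer_instance

def pvWitness_robotomaton : Int × List Int × List Int × List Int :=
  (2, [-1, -1, -1], [0, 1, 2], [1, 2, 3])

def Spec_robotomaton (num : Int) (cache : List Int) (previous : List Int) (sprockets : List Int) (out : Int) : Prop := out = robotomaton_alt num cache previous sprockets
instance (num : Int) (cache : List Int) (previous : List Int) (sprockets : List Int) (out : Int) : Decidable (Spec_robotomaton num cache previous sprockets out) := by unfold Spec_robotomaton; infer_instance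

-- ===== CLAIM (what is proved, stated in full; the proofs are below) =====
def Claim_equal_robotomaton : Prop := ∀ (num : Int) (cache : List Int) (previous : List Int) (sprockets : List Int), Dom_robotomaton num cache previous sprockets → Pre_robotomaton num cache previous sprockets → Spec_robotomaton num cache previous sprockets (robotomaton num cache previous sprockets)

-- ===== LEMMAS AND PROOFS =====

-- the mathematical cost function both ports compute
def pvF (cache previous sprockets : List Int) : Nat → Int
  | i =>
    if cache.getD i 0 ≠ -1 then cache.getD i 0
    else if previous.getD i 0 ≤ 0 then sprockets.getD i 0
    else sprockets.getD i 0 +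
      ((((List.range i).drop ((i : Int) - previous.getD i 0).toNat).attach.map
          (fun k => pvF cache previous sprockets k.1)).sum)
  decreasing_by
    exact List.mem_range.mp (List.mem_of_mem_drop k.2)

-- prefix sums of pvF
def pvP (cache previous sprockets : List Int) (m : Nat) : Int :=
  ((List.range m).map (pvF cache previous sprockets)).sum

lemma pvP_succ (cache previous sprockets : List Int) (m : Nat) :
    pvP cache previous sprockets (m + 1)
      = pvP cache previous sprockets m + pvF cache previous sprockets m := by
  simp [pvP, List.range_succ]

lemma range_drop (d i : Nat) (h : d ≤ i) :
    (List.range i).drop d = (List.range (i - d)).map (fun k => d + k) := by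
  rw [show i = d + (i - d) by omega, List.range_add]
  have h2 := List.drop_left (l₁ := List.range d) (l₂ := (List.range (i - d)).map (fun k => d + k))
  simpa using h2

lemma sum_drop_range (cache previous sprockets : List Int) (d i : Nat) (h : d ≤ i) :
    (((List.range i).drop d).map (pvF cache previous sprockets)).sum
      = pvP cache previous sprockets i - pvP cache previous sprockets d := by
  rw [range_drop d i h]
  unfold pvP
  rw [show i = d + (i - d) by omega, List.range_add]
  simp [List.map_map, Function.comp_def]

lemma pvF_hit (cache previous sprockets : List Int) (i : Nat)
    (hc : cache.getD i 0 ≠ -1) :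
    pvF cache previous sprockets i = cache.getD i 0 := by
  rw [pvF, if_pos hc]

lemma pvF_zero (cache previous sprockets : List Int) (i : Nat)
    (hc : cache.getD i 0 = -1) (hp : previous.getD i 0 ≤ 0) :
    pvF cache previous sprockets i = sprockets.getD i 0 := by
  rw [pvF, if_neg (by simpa using hc), if_pos hp]

lemma pvF_miss (cache previous sprockets : List Int) (i : Nat)
    (hc : cache.getD i 0 = -1) (hp : 0 < previous.getD i 0)
    (hpi : previous.getD i 0 ≤ (i : Int)) :
    pvF cache previous sprockets i
      = sprockets.getD i 0 +
        (pvP cache previous sprockets i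
          - pvP cache previous sprockets ((i : Int) - previous.getD i 0).toNat) := by
  rw [pvF, if_neg (by simpa using hc), if_neg (by omega)]
  have hmap : ((((List.range i).drop ((i : Int) - previous.getD i 0).toNat).attach.map
        (fun k => pvF cache previous sprockets k.1)))
      = (((List.range i).drop ((i : Int) - previous.getD i 0).toNat).map
        (pvF cache previous sprockets)) := by
    conv_rhs => rw [← List.attach_map_subtype_val
      ((List.range i).drop ((i : Int) - previous.getD i 0).toNat)]
    rw [List.map_map]
    rfl
  rw [hmap, sum_drop_range cache previous sprockets _ i (by omega)]

lemma getD_set_eq (l : List Int) (i j : Nat) (v : Int) (hi : i < l.length) :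
    (l.set i v).getD j 0 = if j = i then v else l.getD j 0 := by
  simp only [List.getD_eq_getElem?_getD, List.getElem?_set]
  by_cases h : j = i
  · simp [h, hi]
  · have h' : i ≠ j := fun hh => h hh.symm
    simp [h, h']

lemma getD_of_lt {l : List Int} {i : Nat} (h : i < l.length) :
    PySem.List.pyGet? l (i : Int) = some (l.getD i 0) := by
  rw [PySem.List.pyGet?_natCast, List.getElem?_eq_getElem h,
    List.getD_eq_getElem l 0 h]

lemma fuelA (cache previous sprockets : List Int) (num : Int)
    (hcl : num < (cache.length : Int))
    (hpl : num < (previous.length : Int)) (hsl : num < (sprockets.length : Int))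
    (hprev : ∀ i : Nat, (i : Int) ≤ num → cache.getD i 0 = -1 → previous.getD i 0 ≤ (i : Int)) :
    ∀ (fuel : Nat) (i : Nat) (c' : List Int), i < fuel → (i : Int) ≤ num →
      c'.length = cache.length →
      (∀ j : Nat, j < cache.length →
        c'.getD j 0 = cache.getD j 0 ∨ c'.getD j 0 = pvF cache previous sprockets j) →
      (robotomatonFuel fuel (i : Int) c' previous sprockets).1
          = pvF cache previous sprockets i ∧
      (robotomatonFuel fuel (i : Int) c' previous sprockets).2.length = cache.length ∧
      (∀ j : Nat, j < cache.length →
        (robotomatonFuel fuel (i : Int) c' previous sprockets).2.getD j 0 = cache.getD j 0 ∨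
        (robotomatonFuel fuel (i : Int) c' previous sprockets).2.getD j 0
          = pvF cache previous sprockets j) := by
  intro fuel
  induction fuel with
  | zero => intro i c' h; omega
  | succ fuel IH =>
    intro i c' hif hile hlen hinv
    have hicache : i < cache.length := by omega
    have hic : i < c'.length := by omega
    have hip : i < previous.length := by omega
    have his : i < sprockets.length := by omega
    have hgc := getD_of_lt hic
    have hgp := getD_of_lt hip
    have hgs := getD_of_lt his
    simp only [robotomatonFuel, hgc, hgp, hgs]
    by_cases hne : c'.getD i 0 ≠ -1
    · rw [if_pos hne]
      refine ⟨?_, hlen, hinv⟩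
      rcases hinv i hicache with h | h
      · rw [h, ← pvF_hit cache previous sprockets i (h ▸ hne)]
      · exact h
    · push_neg at hne
      rw [if_neg (by simpa using hne)]
      have hc0 : cache.getD i 0 = -1 := by
        rcases hinv i hicache with h | h
        · rw [← h]; exact hne
        · by_contra hx
          have h2 := pvF_hit cache previous sprockets i hx
          rw [h, h2] at hne
          exact hx hne
      by_cases hp0 : previous.getD i 0 = 0
      · rw [if_pos hp0]
        refine ⟨?_, hlen, hinv⟩
        rw [pvF_zero cache previous sprockets i hc0 (by omega)]
      · rw [if_neg hp0]
        by_cases hpneg : previous.getD i 0 ≤ 0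
        · -- negative previous: empty range, like the zero case but the cache is written
          rw [PySem.List.pyRange_neg_one_eq_nil (by omega)]
          simp only [List.foldl_nil]
          have hval : sprockets.getD i 0 = pvF cache previous sprockets i :=
            (pvF_zero cache previous sprockets i hc0 hpneg).symm
          refine ⟨hval, ?_, ?_⟩
          · simp [PySem.List.pySetD_natCast, hlen]
          · intro j hj
            rw [PySem.List.pySetD_natCast, getD_set_eq c' i j _ hic]
            by_cases hji : j = i
            · rw [if_pos hji, hval, hji]
              exact Or.inr rfl
            · rw [if_neg hji]
              exact hinv j hj
        · push_neg at hpneg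
          have hple : previous.getD i 0 ≤ (i : Int) := hprev i hile hc0
          -- inner fold over the recursive calls
          have inner : ∀ (l : List Int), (∀ k ∈ l, 0 ≤ k ∧ k < (i : Int)) →
              ∀ (a : Int) (c₂ : List Int), c₂.length = cache.length →
              (∀ j : Nat, j < cache.length →
                c₂.getD j 0 = cache.getD j 0 ∨ c₂.getD j 0 = pvF cache previous sprockets j) →
              (l.foldl (fun (acc : Int × List Int) i =>
                  let t := robotomatonFuel fuel i acc.2 previous sprockets
                  (acc.1 + t.1, t.2)) (a, c₂)).1
                = a + (l.map (fun k => pvF cache previous sprockets k.toNat)).sum ∧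
              (l.foldl (fun (acc : Int × List Int) i =>
                  let t := robotomatonFuel fuel i acc.2 previous sprockets
                  (acc.1 + t.1, t.2)) (a, c₂)).2.length = cache.length ∧
              (∀ j : Nat, j < cache.length →
                (l.foldl (fun (acc : Int × List Int) i =>
                  let t := robotomatonFuel fuel i acc.2 previous sprockets
                  (acc.1 + t.1, t.2)) (a, c₂)).2.getD j 0 = cache.getD j 0 ∨
                (l.foldl (fun (acc : Int × List Int) i =>
                  let t := robotomatonFuel fuel i acc.2 previous sprockets
                  (acc.1 + t.1, t.2)) (a, c₂)).2.getD j 0 = pvF cache previous sprockets j) := by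
            intro l
            induction l with
            | nil => intro _ a c₂ hl2 hi2; exact ⟨by simp, hl2, hi2⟩
            | cons k t IHl =>
              intro hmem a c₂ hl2 hi2
              obtain ⟨hk0, hki⟩ := hmem k (by simp)
              have hkc : ((k.toNat : Nat) : Int) = k := by omega
              have hrec := IH k.toNat c₂ (by omega) (by omega) hl2 hi2
              rw [hkc] at hrec
              obtain ⟨hv, hl3, hi3⟩ := hrec
              simp only [List.foldl_cons]
              obtain ⟨hv4, hl4, hi4⟩ := IHl (fun x hx => hmem x (by simp [hx]))
                (a + (robotomatonFuel fuel k c₂ previous sprockets).1)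
                (robotomatonFuel fuel k c₂ previous sprockets).2 hl3 hi3
              refine ⟨?_, hl4, hi4⟩
              rw [hv4, hv]
              simp only [List.map_cons, List.sum_cons]
              ring
          have hmemR : ∀ k ∈ PySem.List.pyRange ((i : Int) - 1)
              ((i : Int) - previous.getD i 0 - 1) (-1), 0 ≤ k ∧ k < (i : Int) := by
            intro k hk
            rw [PySem.List.mem_pyRange_neg_one] at hk
            omega
          obtain ⟨hv, hl2, hi2⟩ := inner _ hmemR (sprockets.getD i 0) c' hlen hinv
          have hsum : ((PySem.List.pyRange ((i : Int) - 1)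
                ((i : Int) - previous.getD i 0 - 1) (-1)).map
                (fun k => pvF cache previous sprockets k.toNat)).sum
              = pvP cache previous sprockets i
                - pvP cache previous sprockets ((i : Int) - previous.getD i 0).toNat := by
            rw [PySem.List.pyRange_neg_one_eq_reverse, List.map_reverse, List.sum_reverse]
            rw [show (i : Int) - previous.getD i 0 - 1 + 1 = (i : Int) - previous.getD i 0 by ring,
              show (i : Int) - 1 + 1 = (i : Int) by ring]
            rw [PySem.List.pyRange_one, List.map_map]
            have hfun : ((fun k => pvF cache previous sprockets k.toNat) ∘
                  (fun k : Nat => (i : Int) - previous.getD i 0 + (k : Int)))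
                = fun k : Nat =>
                    pvF cache previous sprockets (((i : Int) - previous.getD i 0).toNat + k) := by
              funext k
              simp only [Function.comp_apply]
              congr 1
              omega
            rw [hfun]
            rw [← sum_drop_range cache previous sprockets
              ((i : Int) - previous.getD i 0).toNat i (by omega),
              range_drop _ i (by omega), List.map_map]
            congr 1
            rw [show ((i : Int) - ((i : Int) - previous.getD i 0)).toNat
              = i - ((i : Int) - previous.getD i 0).toNat by omega]
            rfl
          have hval : (sprockets.getD i 0 +
                ((PySem.List.pyRange ((i : Int) - 1)
                  ((i : Int) - previous.getD i 0 - 1) (-1)).map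
                  (fun k => pvF cache previous sprockets k.toNat)).sum)
              = pvF cache previous sprockets i := by
            rw [hsum, pvF_miss cache previous sprockets i hc0 hpneg hple]
          refine ⟨hv.trans hval, ?_, ?_⟩
          · rw [PySem.List.pySetD_natCast, List.length_set]
            exact hl2
          · intro j hj
            rw [PySem.List.pySetD_natCast,
              getD_set_eq _ i j _ (lt_of_lt_of_eq hicache hl2.symm)]
            by_cases hji : j = i
            · rw [if_pos hji, hji]
              exact Or.inr (hv.trans hval)
            · rw [if_neg hji]
              exact hi2 j hj

lemma foldB (cache previous sprockets : List Int) (num : Int)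
    (hpl : num < (previous.length : Int)) (hsl : num < (sprockets.length : Int))
    (hprev : ∀ i : Nat, (i : Int) ≤ num → cache.getD i 0 = -1 → previous.getD i 0 ≤ (i : Int)) :
    ∀ (m : Nat), (m : Int) ≤ num + 1 →
      ((PySem.List.pyRange 0 (m : Int) 1).foldl
        (fun (st : List Int × Int) i =>
          let v :=
            if PySem.List.pyGetD cache i 0 ≠ -1 then PySem.List.pyGetD cache i 0
            else if PySem.List.pyGetD previous i 0 ≤ 0 then PySem.List.pyGetD sprockets i 0
            else PySem.List.pyGetD sprockets i 0 + PySem.List.pyGetD st.1 i 0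
                 - PySem.List.pyGetD st.1 (i - PySem.List.pyGetD previous i 0) 0
          (st.1 ++ [PySem.List.pyGetD st.1 i 0 + v], v))
        ([0], 0))
      = ((List.range (m + 1)).map (pvP cache previous sprockets),
          if m = 0 then 0 else pvF cache previous sprockets (m - 1)) := by
  intro m
  induction m with
  | zero =>
    intro _
    rw [show ((0 : Nat) : Int) = (0 : Int) by rfl, PySem.List.pyRange_one_eq_nil le_rfl]
    simp [pvP]
  | succ m IHm =>
    intro hm
    have hmle : (m : Int) ≤ num := by push_cast at hm; omega
    have hrange : PySem.List.pyRange 0 ((m + 1 : Nat) : Int) 1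
        = PySem.List.pyRange 0 (m : Int) 1 ++ [(m : Int)] := by
      push_cast
      exact PySem.List.pyRange_one_succ_right (by positivity)
    rw [hrange, List.foldl_append, IHm (by push_cast; omega)]
    simp only [List.foldl_cons, List.foldl_nil]
    have hgetP : ∀ k : Nat, k < m + 1 →
        ((List.range (m + 1)).map (pvP cache previous sprockets)).getD k 0
          = pvP cache previous sprockets k := by
      intro k hk
      rw [List.getD_eq_getElem _ _ (by simpa using hk)]
      simp
    have hpfx : PySem.List.pyGetD
        ((List.range (m + 1)).map (pvP cache previous sprockets)) (m : Int) 0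
          = pvP cache previous sprockets m := by
      rw [PySem.List.pyGetD_natCast]
      exact hgetP m (by omega)
    have hvF : (if PySem.List.pyGetD cache (m : Int) 0 ≠ -1 then PySem.List.pyGetD cache (m : Int) 0
            else if PySem.List.pyGetD previous (m : Int) 0 ≤ 0 then PySem.List.pyGetD sprockets (m : Int) 0
            else PySem.List.pyGetD sprockets (m : Int) 0
                 + PySem.List.pyGetD ((List.range (m + 1)).map (pvP cache previous sprockets)) (m : Int) 0
                 - PySem.List.pyGetD ((List.range (m + 1)).map (pvP cache previous sprockets))
                     ((m : Int) - PySem.List.pyGetD previous (m : Int) 0) 0)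
        = pvF cache previous sprockets m := by
      rw [PySem.List.pyGetD_natCast, PySem.List.pyGetD_natCast, PySem.List.pyGetD_natCast]
      by_cases hc : cache.getD m 0 ≠ -1
      · rw [if_pos hc, pvF_hit cache previous sprockets m hc]
      · push_neg at hc
        rw [if_neg (by simpa using hc)]
        by_cases hp : previous.getD m 0 ≤ 0
        · rw [if_pos hp, pvF_zero cache previous sprockets m hc hp]
        · push_neg at hp
          rw [if_neg (by omega)]
          have hple : previous.getD m 0 ≤ (m : Int) := hprev m hmle hc
          have hdc : (m : Int) - previous.getD m 0
              = ((((m : Int) - previous.getD m 0).toNat : Nat) : Int) := by omega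
          rw [hpfx, hdc, PySem.List.pyGetD_natCast,
            hgetP (((m : Int) - previous.getD m 0).toNat) (by omega),
            pvF_miss cache previous sprockets m hc hp hple]
          ring
    rw [hvF, hpfx]
    simp only [Prod.mk.injEq]
    refine ⟨?_, by simp⟩
    rw [show m + 1 + 1 = (m + 1) + 1 from rfl, List.range_succ (n := m + 1), List.map_append]
    simp [pvP_succ]

-- ===== VERDICT (by name: the statement is the Claim_ definition above) =====
theorem robotomaton_spec : Claim_equal_robotomaton := by
  intro num cache previous sprockets _ hpre
  obtain ⟨hin, hor⟩ := hpre
  unfold Spec_robotomaton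
  rcases hcg : PySem.List.pyGet? cache num with _ | c
  · rw [PySem.List.pyGet?_eq_none_iff] at hcg
    exact absurd hin hcg
  have hcd : PySem.List.pyGetD cache num 0 = c := by
    simp [PySem.List.pyGetD, hcg]
  by_cases hcne : c ≠ -1
  · unfold robotomaton robotomaton_alt
    simp only [robotomatonFuel, hcg]
    rw [if_pos hcne, if_pos hcne]
  · push_neg at hcne
    subst hcne
    have h1 : ¬ PySem.List.pyGetD cache num 0 ≠ -1 := by rw [hcd]; simp
    rcases hor with h | h
    · exact absurd h h1
    obtain ⟨hnn, hplen, hslen, hprev⟩ := h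
    have hclen : num < (cache.length : Int) := hin.2
    have hnum : num = ((num.toNat : Nat) : Int) := by omega
    obtain ⟨hA, -, -⟩ := fuelA cache previous sprockets num hclen hplen hslen hprev
      (num.toNat + 1) num.toNat cache (by omega) (by omega) rfl (fun j _ => Or.inl rfl)
    have hB := foldB cache previous sprockets num hplen hslen hprev
      (num.toNat + 1) (by omega)
    have hA2 : robotomaton num cache previous sprockets
        = pvF cache previous sprockets num.toNat := by
      rw [← hnum] at hA
      exact hA
    have hB2 : robotomaton_alt num cache previous sprockets
        = pvF cache previous sprockets num.toNat := by
      unfold robotomaton_alt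
      simp only [hcg]
      rw [if_neg (by simp)]
      rw [show num + 1 = ((num.toNat + 1 : Nat) : Int) by omega, hB]
      simp
    rw [hA2, hB2]
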